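-- pv_equiv track=rewrite | github.com/ifsports/competitions-service | competitions/api/v1/services/elimination_services/genarate_eliminations.py | get_elimination_round_names
-- ===== SOURCE A (Python) =====
-- from math import log2, ceil
--
-- def get_elimination_round_names(num_teams: int) -> list:
--     """Retorna uma lista com os nomes das fases eliminatórias."""
--     if num_teams < 2:
--         return []
--
--     num_rounds = int(log2(num_teams))
--     names = []
--
--     round_name_map = {
--         1: "Final",
--         2: "Semifinais",
--         4: "Quartas de Final",
--         8: "Oitavas de Final",
--         16: "16-avos de Final"
--     }
--
--     for i in range(num_rounds):
--         num_matches_in_stage = 2**(num_rounds - 1 - i)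
--
--         round_name = round_name_map.get(num_matches_in_stage, f'Fase de {num_matches_in_stage * 2}')
--         names.append(round_name)
--
--     return names
-- ===== SOURCE B (Python) =====
-- from math import log2
--
-- # The last five rounds always carry these fixed names (stage sizes 16,8,4,2,1).
-- _NAMED_TAIL = ["16-avos de Final", "Oitavas de Final", "Quartas de Final", "Semifinais", "Final"]
--
--
-- def get_elimination_round_names(num_teams: int) -> list:
--     """Retorna uma lista com os nomes das fases eliminatórias."""
--     if num_teams < 2:
--         return []
--     r = int(log2(num_teams))
--     if r <= 5:
--         return _NAMED_TAIL[5 - r:]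
--     return [f'Fase de {2**k}' for k in range(r, 5, -1)] + _NAMED_TAIL
-- ===== Notes on version B (the rewrite author's own statement) =====
-- stated objective: alternative
-- what changed: B replaces A's per-round dict lookup loop by a constant 5-name suffix list sliced with 5-r, prepending generated 'Fase de 2^k' names only when r > 5, so the dictionary and the stage-size loop disappear entirely.
import Mathlib
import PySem

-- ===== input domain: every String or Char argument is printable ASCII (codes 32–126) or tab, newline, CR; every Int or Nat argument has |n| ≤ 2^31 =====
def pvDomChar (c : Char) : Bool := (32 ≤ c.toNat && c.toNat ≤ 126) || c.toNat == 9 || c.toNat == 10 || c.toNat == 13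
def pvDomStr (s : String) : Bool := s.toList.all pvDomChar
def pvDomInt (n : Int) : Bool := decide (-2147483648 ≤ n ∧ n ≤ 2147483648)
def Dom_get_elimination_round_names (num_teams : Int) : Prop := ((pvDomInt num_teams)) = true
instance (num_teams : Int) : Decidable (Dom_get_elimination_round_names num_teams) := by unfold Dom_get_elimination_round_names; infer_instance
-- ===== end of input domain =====

-- B replaces A's per-round dict-lookup loop by a constant 5-name suffix list sliced with 5-r,
-- prefixed by generated 'Fase de 2^k' names only when r > 5 (alternative decomposition).


-- ===== PORT A =====
def get_elimination_round_names (num_teams : Int) : List String :=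
  if num_teams < 2 then []
  else
    -- int(log2(num_teams)) ported as the integer floor-log: exact, since float log2
    -- is floored correctly for every 2 ≤ num_teams ≤ 2^31 (the stated domain)
    let num_rounds : Int := (Nat.log 2 num_teams.toNat : Int)
    let round_name_map : PySem.Dict Int String :=
      PySem.Dict.ofList [(1, "Final"), (2, "Semifinais"), (4, "Quartas de Final"),
                         (8, "Oitavas de Final"), (16, "16-avos de Final")]
    (PySem.List.pyRange 0 num_rounds 1).foldl
      (fun names i =>
        -- 2**(num_rounds - 1 - i): the exponent is ≥ 0 for every i in the range, so .toNat is exact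
        let num_matches_in_stage : Int := (2 : Int) ^ (num_rounds - 1 - i).toNat
        names ++ [round_name_map.getD num_matches_in_stage
                    ("Fase de " ++ PySem.Int.toStr (num_matches_in_stage * 2))])
      []

-- ===== PORT B =====
def pvNamedTail : List String :=
  ["16-avos de Final", "Oitavas de Final", "Quartas de Final", "Semifinais", "Final"]

def get_elimination_round_names_alt (num_teams : Int) : List String :=
  if num_teams < 2 then []
  else
    -- same int(log2(num_teams)) port as above (exact on the stated domain)
    let r : Int := (Nat.log 2 num_teams.toNat : Int)
    if r ≤ 5 then PySem.List.slice pvNamedTail (some (5 - r)) none   -- _NAMED_TAIL[5 - r:]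
    else
      -- [f'Fase de {2**k}' for k in range(r, 5, -1)]; every k there is > 5, so .toNat is exact
      ((PySem.List.pyRange r 5 (-1)).map
        (fun k => "Fase de " ++ PySem.Int.toStr ((2 : Int) ^ k.toNat))) ++ pvNamedTail

-- ===== PRECONDITION & SPEC =====
def Spec_get_elimination_round_names (num_teams : Int) (out : List String) : Prop := out = get_elimination_round_names_alt num_teams
instance (num_teams : Int) (out : List String) : Decidable (Spec_get_elimination_round_names num_teams out) := by unfold Spec_get_elimination_round_names; infer_instance

-- ===== CLAIM (what is proved, stated in full; the proofs are below) =====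
def Claim_equal_get_elimination_round_names : Prop := ∀ (num_teams : Int), Dom_get_elimination_round_names num_teams → Spec_get_elimination_round_names num_teams (get_elimination_round_names num_teams)

-- ===== LEMMAS AND PROOFS =====

-- both ports depend on num_teams only through r = ⌊log2 num_teams⌋; for every r reachable
-- on the domain (r ≤ 31) the loop result of A equals B's slice/prefix expression
theorem pv_bodies_eq (r : Nat) (hr : r ≤ 31) :
    (PySem.List.pyRange 0 (r : Int) 1).foldl
      (fun names i =>
        names ++ [(PySem.Dict.ofList [((1 : Int), "Final"), (2, "Semifinais"), (4, "Quartas de Final"),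
                         (8, "Oitavas de Final"), (16, "16-avos de Final")]).getD
                    ((2 : Int) ^ ((r : Int) - 1 - i).toNat)
                    ("Fase de " ++ PySem.Int.toStr (((2 : Int) ^ ((r : Int) - 1 - i).toNat) * 2))])
      [] =
    (if (r : Int) ≤ 5 then PySem.List.slice pvNamedTail (some (5 - (r : Int))) none
     else ((PySem.List.pyRange (r : Int) 5 (-1)).map
        (fun k => "Fase de " ++ PySem.Int.toStr ((2 : Int) ^ k.toNat))) ++ pvNamedTail) := by
  interval_cases r <;> decide

theorem pv_log_le (num_teams : Int) (h : Dom_get_elimination_round_names num_teams) :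
    Nat.log 2 num_teams.toNat ≤ 31 := by
  have hn : num_teams.toNat ≤ 2 ^ 31 := by
    simp only [Dom_get_elimination_round_names, pvDomInt, decide_eq_true_eq] at h
    omega
  calc Nat.log 2 num_teams.toNat ≤ Nat.log 2 (2 ^ 31) := Nat.log_mono_right hn
    _ = 31 := Nat.log_pow (b := 2) (by norm_num) 31

-- ===== VERDICT (by name: the statement is the Claim_ definition above) =====
theorem get_elimination_round_names_spec : Claim_equal_get_elimination_round_names := by
  intro num_teams hdom
  unfold Spec_get_elimination_round_names get_elimination_round_names get_elimination_round_names_alt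
  by_cases h2 : num_teams < 2
  · simp [h2]
  · simp only [h2, if_false]
    exact pv_bodies_eq _ (pv_log_le num_teams hdom)
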